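-- pv_equiv track=rewrite | github.com/usernotfound-101/AADProject | PROBLEMS/TSP/csv-gen/purely-csv.py | minimum_matching
-- ===== SOURCE A (Python) =====
-- def minimum_matching(adj, odd):
--     used = set()
--     pairs = []
--     distlist = []
--     for i in range(len(odd)):
--         for j in range(i + 1, len(odd)):
--             u, v = odd[i], odd[j]
--             distlist.append((adj[u, v], u, v))
--     distlist.sort()
--     for w, u, v in distlist:
--         if u not in used and v not in used:
--             used.add(u)
--             used.add(v)
--             pairs.append((u, v, w))
--     return pairs
-- ===== SOURCE B (Python) =====
-- def _pairs_rec(adj, free):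
--     if not free:
--         return []
--     u, rest = free[0], free[1:]
--     return [(adj[u, v], u, v) for v in rest] + _pairs_rec(adj, rest)
--
--
-- def minimum_matching(adj, odd):
--     pairs = []
--     free = list(odd)
--     while len(free) >= 2:
--         w, u, v = min(_pairs_rec(adj, free))
--         pairs.append((u, v, w))
--         free = [x for x in free if x != u and x != v]
--     return pairs
-- ===== Notes on version B (the rewrite author's own statement) =====
-- stated objective: alternative
-- what changed: B drops A's build-all-pairs-then-sort-then-sweep pipeline and keeps no used-set: it maintains a shrinking free-vertex list, and while at least two vertices remain it recursively enumerates the free pairs, takes the global minimum (w,u,v) tuple, records it and filters both endpoints out of the list; this repeated-minimum selection reproduces A's greedy matching and tie-breaking without sorting.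
import Mathlib
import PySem

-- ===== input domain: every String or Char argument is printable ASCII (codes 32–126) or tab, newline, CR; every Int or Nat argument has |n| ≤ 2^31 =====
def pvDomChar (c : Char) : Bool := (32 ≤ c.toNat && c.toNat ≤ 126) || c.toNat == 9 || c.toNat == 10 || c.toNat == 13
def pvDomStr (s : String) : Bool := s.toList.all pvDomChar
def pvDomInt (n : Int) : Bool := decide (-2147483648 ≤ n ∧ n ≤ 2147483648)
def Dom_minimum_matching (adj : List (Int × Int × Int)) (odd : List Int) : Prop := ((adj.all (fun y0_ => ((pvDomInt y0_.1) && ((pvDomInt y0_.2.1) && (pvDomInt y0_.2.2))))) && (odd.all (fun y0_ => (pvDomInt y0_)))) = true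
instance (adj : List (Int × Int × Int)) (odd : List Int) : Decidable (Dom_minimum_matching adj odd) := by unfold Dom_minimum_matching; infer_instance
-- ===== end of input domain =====

-- B replaces A's build-all-pairs + sort + used-set sweep by a sort-free shrinking-free-list loop
-- that repeatedly rescans the remaining pairs for the minimum (w,u,v) tuple (objective: alternative).

-- shared helper: adj[u,v] on the dict-as-association-list (first matching key; none = KeyError)
def pvLookup (adj : List (Int × Int × Int)) (u v : Int) : Option Int :=
  (adj.find? (fun e => e.1 == u && e.2.1 == v)).map (fun e => e.2.2)

def pvW (adj : List (Int × Int × Int)) (u v : Int) : Int := (pvLookup adj u v).getD 0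

-- Python's `<` on int-triples (lexicographic)
def pvLexLt (x y : Int × Int × Int) : Bool :=
  decide (x.1 < y.1 ∨ (x.1 = y.1 ∧ (x.2.1 < y.2.1 ∨ (x.2.1 = y.2.1 ∧ x.2.2 < y.2.2))))

-- ===== PORT A =====
-- the two nested index loops appending (adj[u,v], u, v)
def pvDistlist (adj : List (Int × Int × Int)) (odd : List Int) : List (Int × Int × Int) :=
  (List.range odd.length).foldl (fun acc i =>
    (List.range' (i+1) (odd.length - (i+1))).foldl (fun acc2 j =>
      acc2 ++ [(pvW adj (odd.getD i 0) (odd.getD j 0), odd.getD i 0, odd.getD j 0)]) acc) []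

def pvInsLex (x : Int × Int × Int) : List (Int × Int × Int) → List (Int × Int × Int)
  | [] => [x]
  | y :: ys => if pvLexLt x y then x :: y :: ys else y :: pvInsLex x ys

-- distlist.sort(): stable insertion sort under Python's tuple `<` (exact: equal triples are identical values;
-- ported by hand because PySem.List.sorted keys need a LinearOrder and Lean's Prod order is not Python's lex order)
def pvSortLex (xs : List (Int × Int × Int)) : List (Int × Int × Int) :=
  xs.foldl (fun acc x => pvInsLex x acc) []

-- the greedy sweep: for w,u,v in distlist: if u not in used and v not in used: …
def pvScanA : List (Int × Int × Int) → PySem.Set Int → List (Int × Int × Int) → List (Int × Int × Int)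
  | [], _, ps => ps
  | e :: rest, s, ps =>
      if !(PySem.Set.contains s e.2.1) && !(PySem.Set.contains s e.2.2) then
        pvScanA rest (PySem.Set.add (PySem.Set.add s e.2.1) e.2.2) (ps ++ [(e.2.1, e.2.2, e.1)])
      else pvScanA rest s ps

def minimum_matching (adj : List (Int × Int × Int)) (odd : List Int) : List (Int × Int × Int) :=
  pvScanA (pvSortLex (pvDistlist adj odd)) PySem.Set.empty []

-- ===== PORT B =====
-- _pairs_rec: structural recursion producing all pairs (adj[u,v], u, v) with u before v in free
def pvPairsRec (adj : List (Int × Int × Int)) : List Int → List (Int × Int × Int)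
  | [] => []
  | u :: rest => rest.map (fun v => (pvW adj u v, u, v)) ++ pvPairsRec adj rest

-- min(...): running minimum, first extremal kept (strict `<`)
def pvMinLex : List (Int × Int × Int) → Option (Int × Int × Int)
  | [] => none
  | c :: cs => some (cs.foldl (fun b x => if pvLexLt x b then x else b) c)

-- the while-loop over the shrinking free list; fuel only makes it total (the free list strictly
-- shrinks each round, so fuel = |odd| never runs out)
def pvLoopB (adj : List (Int × Int × Int)) :
    Nat → List Int → List (Int × Int × Int) → List (Int × Int × Int)
  | 0, _, ps => ps
  | fuel+1, free, ps =>
      if free.length < 2 then ps else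
      match pvMinLex (pvPairsRec adj free) with
      | none => ps
      | some e => pvLoopB adj fuel
          (free.filter (fun x => !(x == e.2.1) && !(x == e.2.2)))
          (ps ++ [(e.2.1, e.2.2, e.1)])

def minimum_matching_alt (adj : List (Int × Int × Int)) (odd : List Int) : List (Int × Int × Int) :=
  pvLoopB adj odd.length odd []

-- ===== PRECONDITION & SPEC =====
-- Pre_ excludes (a) inputs where Python A raises KeyError (some pair of odd vertices missing from adj) and
-- (b) association lists with duplicate (u,v) keys, which do not correspond to any Python dict input
-- (a dict literal collapses duplicates), so the dict ↔ association-list encoding stays unambiguous.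
def Pre_minimum_matching (adj : List (Int × Int × Int)) (odd : List Int) : Prop :=
  (adj.map (fun e => (e.1, e.2.1))).Nodup ∧
  ∀ i, i < odd.length → ∀ j, j < odd.length → i < j →
    (pvLookup adj (odd.getD i 0) (odd.getD j 0)).isSome = true
instance (adj : List (Int × Int × Int)) (odd : List Int) : Decidable (Pre_minimum_matching adj odd) := by
  unfold Pre_minimum_matching; infer_instance

def pvWitness_minimum_matching : (List (Int × Int × Int)) × List Int := ([(0, 1, 5)], [0, 1])

def Spec_minimum_matching (adj : List (Int × Int × Int)) (odd : List Int) (out : List (Int × Int × Int)) : Prop := out = minimum_matching_alt adj odd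
instance (adj : List (Int × Int × Int)) (odd : List Int) (out : List (Int × Int × Int)) : Decidable (Spec_minimum_matching adj odd out) := by unfold Spec_minimum_matching; infer_instance

-- ===== CLAIM (what is proved, stated in full; the proofs are below) =====
def Claim_equal_minimum_matching : Prop := ∀ (adj : List (Int × Int × Int)) (odd : List Int), Dom_minimum_matching adj odd → Pre_minimum_matching adj odd → Spec_minimum_matching adj odd (minimum_matching adj odd)

-- ===== LEMMAS AND PROOFS =====

-- proof-only helpers -----------------------------------------------------

def pvFree (s : PySem.Set Int) (e : Int × Int × Int) : Bool :=
  !(PySem.Set.contains s e.2.1) && !(PySem.Set.contains s e.2.2)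

-- order lemmas ------------------------------------------------------------

theorem pvLt_irrefl (x : Int × Int × Int) : pvLexLt x x = false := by
  obtain ⟨a, b, c⟩ := x
  simp only [pvLexLt, decide_eq_false_iff_not]
  omega

theorem pvLt_asymm {x y : Int × Int × Int} (h : pvLexLt x y = true) : pvLexLt y x = false := by
  obtain ⟨a, b, c⟩ := x; obtain ⟨d, e, f⟩ := y
  simp only [pvLexLt, decide_eq_true_eq, decide_eq_false_iff_not] at *
  omega

theorem pvLe_trans {x y z : Int × Int × Int} (h1 : pvLexLt y x = false)
    (h2 : pvLexLt z y = false) : pvLexLt z x = false := by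
  obtain ⟨a, b, c⟩ := x; obtain ⟨d, e, f⟩ := y; obtain ⟨g, h, i⟩ := z
  simp only [pvLexLt, decide_eq_false_iff_not] at *
  omega

theorem pvLtLe_trans {x y z : Int × Int × Int} (h1 : pvLexLt x y = true)
    (h2 : pvLexLt z y = false) : pvLexLt z x = false := by
  obtain ⟨a, b, c⟩ := x; obtain ⟨d, e, f⟩ := y; obtain ⟨g, h, i⟩ := z
  simp only [pvLexLt, decide_eq_true_eq, decide_eq_false_iff_not] at *
  omega

theorem pvLeLt_trans {x y z : Int × Int × Int} (h1 : pvLexLt y x = false)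
    (h2 : pvLexLt y z = true) : pvLexLt z x = false := by
  obtain ⟨a, b, c⟩ := x; obtain ⟨d, e, f⟩ := y; obtain ⟨g, h, i⟩ := z
  simp only [pvLexLt, decide_eq_true_eq, decide_eq_false_iff_not] at *
  omega

theorem pvLe_antisymm {x y : Int × Int × Int} (h1 : pvLexLt x y = false)
    (h2 : pvLexLt y x = false) : x = y := by
  obtain ⟨a, b, c⟩ := x; obtain ⟨d, e, f⟩ := y
  simp only [pvLexLt, decide_eq_false_iff_not] at *
  simp only [Prod.mk.injEq]
  omega

-- insertion sort ----------------------------------------------------------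

theorem mem_insLex {x y : Int × Int × Int} : ∀ {l : List (Int × Int × Int)},
    y ∈ pvInsLex x l ↔ y = x ∨ y ∈ l := by
  intro l
  induction l with
  | nil => simp [pvInsLex]
  | cons z zs ih =>
      simp only [pvInsLex]
      split
      · simp only [List.mem_cons]
      · simp only [List.mem_cons, ih]; tauto

theorem perm_insLex (x : Int × Int × Int) : ∀ (l : List (Int × Int × Int)),
    (pvInsLex x l).Perm (x :: l) := by
  intro l
  induction l with
  | nil => simp [pvInsLex]
  | cons z zs ih =>
      simp only [pvInsLex]
      split
      · exact List.Perm.refl _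
      · exact (ih.cons z).trans (List.Perm.swap x z zs)

theorem pairwise_insLex {x : Int × Int × Int} : ∀ {l : List (Int × Int × Int)},
    l.Pairwise (fun a b => pvLexLt b a = false) →
    (pvInsLex x l).Pairwise (fun a b => pvLexLt b a = false) := by
  intro l
  induction l with
  | nil => intro _; simp [pvInsLex]
  | cons z zs ih =>
      intro h
      rw [List.pairwise_cons] at h
      obtain ⟨hz, hzs⟩ := h
      simp only [pvInsLex]
      split
      next hlt =>
        rw [List.pairwise_cons]
        constructor
        · intro b hb
          rcases List.mem_cons.mp hb with rfl | hb
          · exact pvLt_asymm hlt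
          · exact pvLtLe_trans hlt (hz b hb)
        · exact List.pairwise_cons.mpr ⟨hz, hzs⟩
      next hlt =>
        rw [List.pairwise_cons]
        constructor
        · intro b hb
          rcases mem_insLex.mp hb with rfl | hb
          · simpa using hlt
          · exact hz b hb
        · exact ih hzs

theorem perm_sortLex_aux : ∀ (l acc : List (Int × Int × Int)),
    (l.foldl (fun acc x => pvInsLex x acc) acc).Perm (acc ++ l) := by
  intro l
  induction l with
  | nil => simp
  | cons x xs ih =>
      intro acc
      simp only [List.foldl_cons]
      exact ((ih (pvInsLex x acc)).trans
        (((perm_insLex x acc).append_right xs).trans List.perm_middle.symm))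

theorem perm_sortLex (l : List (Int × Int × Int)) : (pvSortLex l).Perm l := by
  simpa using perm_sortLex_aux l []

theorem pairwise_sortLex_aux : ∀ (l acc : List (Int × Int × Int)),
    acc.Pairwise (fun a b => pvLexLt b a = false) →
    (l.foldl (fun acc x => pvInsLex x acc) acc).Pairwise (fun a b => pvLexLt b a = false) := by
  intro l
  induction l with
  | nil => intro acc h; simpa using h
  | cons x xs ih =>
      intro acc h
      exact ih (pvInsLex x acc) (pairwise_insLex h)

theorem pairwise_sortLex (l : List (Int × Int × Int)) :
    (pvSortLex l).Pairwise (fun a b => pvLexLt b a = false) := by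
  exact pairwise_sortLex_aux l [] (by simp)

-- min ---------------------------------------------------------------------

theorem foldl_min_spec : ∀ (cs : List (Int × Int × Int)) (c : Int × Int × Int),
    ((cs.foldl (fun b x => if pvLexLt x b then x else b) c = c ∨
      cs.foldl (fun b x => if pvLexLt x b then x else b) c ∈ cs) ∧
     pvLexLt c (cs.foldl (fun b x => if pvLexLt x b then x else b) c) = false ∧
     ∀ x ∈ cs, pvLexLt x (cs.foldl (fun b x => if pvLexLt x b then x else b) c) = false) := by
  intro cs
  induction cs with
  | nil => intro c; simp [pvLt_irrefl]
  | cons z zs ih =>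
      intro c
      simp only [List.foldl_cons]
      by_cases hlt : pvLexLt z c = true
      · simp only [hlt, if_pos]
        obtain ⟨hmem, hle, hall⟩ := ih z
        refine ⟨?_, ?_, ?_⟩
        · rcases hmem with h | h
          · right; simp [h]
          · right; exact List.mem_cons_of_mem _ h
        · exact pvLeLt_trans hle hlt
        · intro x hx
          rcases List.mem_cons.mp hx with rfl | hx
          · exact hle
          · exact hall x hx
      · rw [Bool.not_eq_true] at hlt
        simp only [hlt, if_neg, Bool.false_eq_true, not_false_iff]
        obtain ⟨hmem, hle, hall⟩ := ih c
        refine ⟨?_, hle, ?_⟩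
        · rcases hmem with h | h
          · left; exact h
          · right; exact List.mem_cons_of_mem _ h
        · intro x hx
          rcases List.mem_cons.mp hx with rfl | hx
          · exact pvLe_trans hle hlt
          · exact hall x hx

theorem minLex_spec {l : List (Int × Int × Int)} {m : Int × Int × Int}
    (h : pvMinLex l = some m) : m ∈ l ∧ ∀ x ∈ l, pvLexLt x m = false := by
  match l, h with
  | c :: cs, h =>
      simp only [pvMinLex, Option.some.injEq] at h
      obtain ⟨hmem, hle, hall⟩ := foldl_min_spec cs c
      rw [h] at hmem hle hall
      refine ⟨?_, ?_⟩
      · rcases hmem with h' | h'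
        · simp [h']
        · exact List.mem_cons_of_mem _ h'
      · intro x hx
        rcases List.mem_cons.mp hx with rfl | hx
        · exact hle
        · exact hall x hx

theorem minLex_eq_none {l : List (Int × Int × Int)} : pvMinLex l = none ↔ l = [] := by
  cases l <;> simp [pvMinLex]

-- index-fold ↔ structural bridge for A's distlist ------------------------

theorem inner_aux (adj : List (Int × Int × Int)) (odd : List Int) (u : Int) :
    ∀ (k s : Nat) (a : List (Int × Int × Int)), s + k = odd.length →
    (List.range' s k).foldl (fun acc2 j =>
        acc2 ++ [(pvW adj u (odd.getD j 0), u, odd.getD j 0)]) a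
      = a ++ ((odd.drop s).map (fun v => (pvW adj u v, u, v))) := by
  intro k
  induction k with
  | zero =>
      intro s a hs
      simp only [Nat.add_zero] at hs; subst hs
      simp [List.drop_length]
  | succ k ih =>
      intro s a hs
      have hlt : s < odd.length := by omega
      rw [List.range'_succ, List.foldl_cons, ih (s+1) _ (by omega),
        List.drop_eq_getElem_cons hlt, List.map_cons, List.getD_eq_getElem odd 0 hlt]
      simp only [List.append_assoc, List.singleton_append]

theorem distlist_structural_aux (adj : List (Int × Int × Int)) (odd : List Int) :
    ∀ (k s : Nat) (a : List (Int × Int × Int)), s + k = odd.length →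
    (List.range' s k).foldl (fun acc i =>
      (List.range' (i+1) (odd.length - (i+1))).foldl (fun acc2 j =>
        acc2 ++ [(pvW adj (odd.getD i 0) (odd.getD j 0), odd.getD i 0, odd.getD j 0)]) acc) a
      = a ++ pvPairsRec adj (odd.drop s) := by
  intro k
  induction k with
  | zero =>
      intro s a hs
      simp only [Nat.add_zero] at hs; subst hs
      simp [List.drop_length, pvPairsRec]
  | succ k ih =>
      intro s a hs
      have hlt : s < odd.length := by omega
      rw [List.range'_succ, List.foldl_cons]
      rw [inner_aux adj odd (odd.getD s 0) (odd.length - (s+1)) (s+1) a (by omega)]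
      rw [ih (s+1) _ (by omega), List.drop_eq_getElem_cons hlt]
      rw [List.getD_eq_getElem odd 0 hlt]
      simp [pvPairsRec, List.append_assoc]

theorem distlist_structural (adj : List (Int × Int × Int)) (odd : List Int) :
    pvDistlist adj odd = pvPairsRec adj odd := by
  unfold pvDistlist
  rw [List.range_eq_range']
  simpa using distlist_structural_aux adj odd odd.length 0 [] (by omega)

-- set / freeness lemmas ----------------------------------------------------

theorem setContains_iff {s : PySem.Set Int} {x : Int} :
    PySem.Set.contains s x = true ↔ x ∈ s := by
  simp [PySem.Set.contains]

theorem setContains_add {s : PySem.Set Int} {u x : Int} :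
    PySem.Set.contains (PySem.Set.add s u) x = (PySem.Set.contains s x || x == u) := by
  rcases h : (PySem.Set.contains s x || x == u) with _ | _
  · simp only [Bool.or_eq_false_iff, beq_eq_false_iff_ne] at h
    rw [Bool.eq_false_iff]
    intro hc
    rcases (PySem.Set.mem_add s u x).mp (setContains_iff.mp hc) with hm | rfl
    · rw [setContains_iff.mpr hm] at h; exact absurd h.1 (by simp)
    · exact h.2 rfl
  · rcases Bool.or_eq_true_iff.mp h with hc | he
    · exact setContains_iff.mpr ((PySem.Set.mem_add s u x).mpr (Or.inl (setContains_iff.mp hc)))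
    · rw [eq_of_beq he]
      exact setContains_iff.mpr ((PySem.Set.mem_add s u u).mpr (Or.inr rfl))

theorem setContains_add_mono {s : PySem.Set Int} {u x : Int}
    (h : PySem.Set.contains s x = true) :
    PySem.Set.contains (PySem.Set.add s u) x = true := by
  rw [setContains_add, h]; rfl

theorem setContains_add_self (s : PySem.Set Int) (u : Int) :
    PySem.Set.contains (PySem.Set.add s u) u = true := by
  rw [setContains_add]; simp

theorem setContains_empty (x : Int) : PySem.Set.contains PySem.Set.empty x = false := by
  simp [PySem.Set.contains, PySem.Set.empty]

theorem pvFree_antitone {s s' : PySem.Set Int} {e : Int × Int × Int}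
    (hsub : ∀ x, PySem.Set.contains s x = true → PySem.Set.contains s' x = true)
    (h : pvFree s e = false) : pvFree s' e = false := by
  unfold pvFree at h ⊢
  cases hx : PySem.Set.contains s e.2.1 with
  | true => rw [hsub _ hx]; rfl
  | false =>
      cases hy : PySem.Set.contains s e.2.2 with
      | true => rw [hsub _ hy]; simp
      | false => rw [hx, hy] at h; simp at h

-- pairsRec lemmas -----------------------------------------------------------

theorem mem_pairsRec_sublist {adj : List (Int × Int × Int)} {e : Int × Int × Int} :
    ∀ {l : List Int}, e ∈ pvPairsRec adj l → [e.2.1, e.2.2].Sublist l := by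
  intro l
  induction l with
  | nil => simp [pvPairsRec]
  | cons u rest ih =>
      intro h
      simp only [pvPairsRec, List.mem_append, List.mem_map] at h
      rcases h with ⟨v, hv, rfl⟩ | h
      · exact (List.singleton_sublist.mpr hv).cons₂ u
      · exact (ih h).cons u

-- pairs of a filtered free list = filtered pairs
theorem pairsRec_filter (adj : List (Int × Int × Int)) (s : PySem.Set Int) :
    ∀ (l : List Int),
      pvPairsRec adj (l.filter (fun x => !PySem.Set.contains s x))
        = (pvPairsRec adj l).filter (pvFree s) := by
  intro l
  induction l with
  | nil => simp [pvPairsRec]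
  | cons u rest ih =>
      simp only [pvPairsRec, List.filter_append, List.filter_cons]
      cases hc : PySem.Set.contains s u with
      | true =>
          simp only [Bool.not_true, Bool.false_eq_true, if_false, ih]
          have hmap : (rest.map (fun v => (pvW adj u v, u, v))).filter (pvFree s) = [] := by
            rw [List.filter_map]
            have hfun : (pvFree s ∘ fun v => (pvW adj u v, u, v)) = fun _ => false := by
              funext v
              show (!PySem.Set.contains s u && !PySem.Set.contains s v) = false
              rw [hc]; rfl
            rw [hfun, List.filter_false, List.map_nil]
          rw [hmap, List.nil_append]
      | false =>
          simp only [Bool.not_false, if_true, pvPairsRec, ih]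
          congr 1
          rw [List.filter_map]
          have hfun : (pvFree s ∘ fun v => (pvW adj u v, u, v))
              = fun v => !PySem.Set.contains s v := by
            funext v
            show (!PySem.Set.contains s u && !PySem.Set.contains s v) = !PySem.Set.contains s v
            rw [hc]; rfl
          rw [hfun]

-- filter-length lemmas ------------------------------------------------------

theorem length_filter_lt_self {α : Type} {q : α → Bool} {u : α} (hq : q u = false) :
    ∀ {l : List α}, u ∈ l → (l.filter q).length < l.length := by
  intro l
  induction l with
  | nil => simp
  | cons x t ih =>
      intro hu
      rcases List.mem_cons.mp hu with rfl | hu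
      · rw [List.filter_cons, hq]
        simp only [Bool.false_eq_true, if_false, List.length_cons]
        have h2 : (t.filter q).length ≤ t.length := List.length_filter_le q t
        omega
      · have h3 := ih hu
        by_cases hqx : q x = true
        · simp only [List.filter_cons, hqx, if_pos, List.length_cons]
          omega
        · rw [Bool.not_eq_true] at hqx
          simp [hqx]
          omega

theorem filter_cons_false {α : Type} {p : α → Bool} {e : α} {l : List α}
    (h : p e = false) : (e :: l).filter p = l.filter p := by
  rw [List.filter_cons, h]; simp

theorem filter_cons_true {α : Type} {p : α → Bool} {e : α} {l : List α}
    (h : p e = true) : (e :: l).filter p = e :: l.filter p := by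
  rw [List.filter_cons, h]; simp

-- the heart: greedy sweep over the sorted list = repeated global-minimum selection over the free list

theorem pv_scan_eq_loop (adj : List (Int × Int × Int)) (odd : List Int) :
    ∀ (L : List (Int × Int × Int)) (fuel : Nat) (s : PySem.Set Int)
      (ps : List (Int × Int × Int)),
      L.Pairwise (fun a b => pvLexLt b a = false) →
      (∀ s' : PySem.Set Int,
        (∀ x, PySem.Set.contains s x = true → PySem.Set.contains s' x = true) →
        ((pvPairsRec adj odd).filter (pvFree s')).Perm (L.filter (pvFree s'))) →
      (odd.filter (fun x => !PySem.Set.contains s x)).length ≤ fuel →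
      pvScanA L s ps
        = pvLoopB adj fuel (odd.filter (fun x => !PySem.Set.contains s x)) ps := by
  intro L
  induction L with
  | nil =>
      intro fuel s ps _ hJ _
      have hnil : (pvPairsRec adj odd).filter (pvFree s) = [] := by
        have h := hJ s (fun _ h => h)
        simpa using h
      cases fuel with
      | zero => rfl
      | succ f =>
          simp only [pvScanA, pvLoopB]
          rw [pairsRec_filter, hnil]
          simp [pvMinLex]
  | cons e rest ih =>
      intro fuel s ps hpw hJ hfuel
      rw [List.pairwise_cons] at hpw
      obtain ⟨he, hrest⟩ := hpw
      cases hfr : pvFree s e with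
      | false =>
          have hstep : pvScanA (e :: rest) s ps = pvScanA rest s ps := by
            simp only [pvScanA]
            have hfr' : (!PySem.Set.contains s e.2.1 && !PySem.Set.contains s e.2.2)
                = false := hfr
            rw [hfr']
            simp
          rw [hstep]
          apply ih fuel s ps hrest _ hfuel
          intro s' hsub
          have h := hJ s' hsub
          rwa [filter_cons_false (pvFree_antitone hsub hfr)] at h
      | true =>
          have hperm : ((pvPairsRec adj odd).filter (pvFree s)).Perm
              (e :: rest.filter (pvFree s)) := by
            have h := hJ s (fun _ h => h)
            rwa [filter_cons_true hfr] at h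
          have he_mem : e ∈ (pvPairsRec adj odd).filter (pvFree s) :=
            hperm.mem_iff.mpr (List.mem_cons_self ..)
          have heDS : e ∈ pvPairsRec adj odd := (List.mem_filter.mp he_mem).1
          have hfr2 : PySem.Set.contains s e.2.1 = false
              ∧ PySem.Set.contains s e.2.2 = false := by
            have h : (!PySem.Set.contains s e.2.1 && !PySem.Set.contains s e.2.2)
                = true := hfr
            simp only [Bool.and_eq_true, Bool.not_eq_true'] at h
            exact h
          -- both endpoints survive the free filter, so the free list has ≥ 2 elements
          have hsub2 : ([e.2.1, e.2.2].filter (fun x => !PySem.Set.contains s x)).Sublist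
              (odd.filter (fun x => !PySem.Set.contains s x)) :=
            (mem_pairsRec_sublist heDS).filter _
          have hfl : [e.2.1, e.2.2].filter (fun x => !PySem.Set.contains s x)
              = [e.2.1, e.2.2] := by
            rw [filter_cons_true (by show (!PySem.Set.contains s e.2.1) = true
                                     rw [hfr2.1]; rfl),
              filter_cons_true (by show (!PySem.Set.contains s e.2.2) = true
                                   rw [hfr2.2]; rfl),
              List.filter_nil]
          have hlen2 : 2 ≤ (odd.filter (fun x => !PySem.Set.contains s x)).length := by
            have := hsub2.length_le
            rw [hfl] at this
            simpa using this
          cases fuel with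
          | zero => omega
          | succ f =>
              -- the global minimum of the free pairs is e
              have hne : (pvPairsRec adj odd).filter (pvFree s) ≠ [] := by
                intro h0
                rw [h0] at hperm
                exact absurd hperm.length_eq (by simp)
              obtain ⟨m, hm⟩ : ∃ m, pvMinLex ((pvPairsRec adj odd).filter (pvFree s)) = some m := by
                cases hmm : pvMinLex ((pvPairsRec adj odd).filter (pvFree s)) with
                | none => exact absurd (minLex_eq_none.mp hmm) hne
                | some m => exact ⟨m, rfl⟩
              obtain ⟨hm_mem, hm_min⟩ := minLex_spec hm
              have h1 : pvLexLt e m = false := hm_min e he_mem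
              have h2 : pvLexLt m e = false := by
                rcases List.mem_cons.mp (hperm.subset hm_mem) with rfl | hmr
                · exact pvLt_irrefl m
                · exact he m (List.mem_filter.mp hmr).1
              rw [pvLe_antisymm h2 h1] at hm
              have hscan : pvScanA (e :: rest) s ps
                  = pvScanA rest (PySem.Set.add (PySem.Set.add s e.2.1) e.2.2)
                      (ps ++ [(e.2.1, e.2.2, e.1)]) := by
                simp only [pvScanA]
                have hfr' : (!PySem.Set.contains s e.2.1 && !PySem.Set.contains s e.2.2)
                    = true := hfr
                rw [hfr']
                simp
              -- the new free list is the filter by the enlarged set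
              have hF' : (odd.filter (fun x => !PySem.Set.contains s x)).filter
                    (fun x => !(x == e.2.1) && !(x == e.2.2))
                  = odd.filter (fun x =>
                      !PySem.Set.contains (PySem.Set.add (PySem.Set.add s e.2.1) e.2.2) x) := by
                rw [List.filter_filter]
                apply List.filter_congr
                intro x _
                rw [setContains_add, setContains_add]
                cases PySem.Set.contains s x <;> cases hxu : x == e.2.1 <;>
                  cases hxv : x == e.2.2 <;> simp
              have hloop : pvLoopB adj (f+1) (odd.filter (fun x => !PySem.Set.contains s x)) ps
                  = pvLoopB adj f (odd.filter (fun x =>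
                      !PySem.Set.contains (PySem.Set.add (PySem.Set.add s e.2.1) e.2.2) x))
                      (ps ++ [(e.2.1, e.2.2, e.1)]) := by
                simp only [pvLoopB]
                rw [if_neg (by omega), pairsRec_filter, hm]
                exact congrArg
                  (fun l => pvLoopB adj f l (ps ++ [(e.2.1, e.2.2, e.1)])) hF'
              rw [hscan, hloop]
              have hsub1 : ∀ x, PySem.Set.contains s x = true →
                  PySem.Set.contains (PySem.Set.add (PySem.Set.add s e.2.1) e.2.2) x = true :=
                fun x hx => setContains_add_mono (setContains_add_mono hx)
              apply ih f _ _ hrest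
              · intro s'' hsub3
                have h := hJ s'' (fun x hx => hsub3 x (hsub1 x hx))
                have hfe : pvFree s'' e = false := by
                  have hc : PySem.Set.contains s'' e.2.1 = true :=
                    hsub3 _ (setContains_add_mono (setContains_add_self s e.2.1))
                  unfold pvFree
                  rw [hc]
                  rfl
                rwa [filter_cons_false hfe] at h
              · -- each round removes e.2.1 from the free list, so it strictly shrinks
                have hu_mem : e.2.1 ∈ odd.filter (fun x => !PySem.Set.contains s x) := by
                  have : e.2.1 ∈ [e.2.1, e.2.2] := by simp
                  rw [← hfl] at this
                  exact hsub2.mem this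
                have hdrop := length_filter_lt_self
                  (q := fun x => !(x == e.2.1) && !(x == e.2.2)) (by simp) hu_mem
                rw [hF'] at hdrop
                omega

-- ===== VERDICT (by name: the statement is the Claim_ definition above) =====
theorem minimum_matching_spec : Claim_equal_minimum_matching := by
  unfold Claim_equal_minimum_matching
  intro adj odd _ _
  unfold Spec_minimum_matching minimum_matching minimum_matching_alt
  have hodd : odd.filter (fun x => !PySem.Set.contains PySem.Set.empty x) = odd := by
    apply List.filter_eq_self.mpr
    intro x _
    rw [setContains_empty]
    rfl
  rw [distlist_structural]
  conv_rhs => rw [← hodd]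
  apply pv_scan_eq_loop
  · exact pairwise_sortLex _
  · intro s' _
    exact List.Perm.filter _ (perm_sortLex (pvPairsRec adj odd)).symm
  · exact le_refl _
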